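-- pv_equiv track=rewrite | github.com/twidi/twistt | twistt.py | _format_env_value
-- ===== SOURCE A (Python) =====
-- def _format_env_value(value: str) -> str:
--     if value == "":
--         return ""
--     special_chars = set(" #\"'\\\n\r\t=")
--     if any(char in special_chars for char in value):
--         escaped = value.replace("\\", "\\\\").replace("\n", "\\n").replace("\r", "\\r").replace('"', '\\"')
--         return f'"{escaped}"'
--     return value
-- ===== SOURCE B (Python) =====
-- def _format_env_value(value: str) -> str:
--     # Single pass: build the escaped form and detect special chars at once.
--     esc = {"\\": "\\\\", "\n": "\\n", "\r": "\\r", '"': '\\"'}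
--     buf = []
--     needs_quote = False
--     for c in value:
--         buf.append(esc.get(c, c))
--         if c in " #\"'\\\n\r\t=":
--             needs_quote = True
--     if needs_quote:
--         return '"' + "".join(buf) + '"'
--     return value
-- ===== Notes on version B (the rewrite author's own statement) =====
-- stated objective: alternative
-- what changed: Fuses A's any()-scan over a special-char set and four chained str.replace passes into one traversal that builds the escaped buffer and a needs-quote flag together; the empty-string guard becomes redundant.
import Mathlib
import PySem

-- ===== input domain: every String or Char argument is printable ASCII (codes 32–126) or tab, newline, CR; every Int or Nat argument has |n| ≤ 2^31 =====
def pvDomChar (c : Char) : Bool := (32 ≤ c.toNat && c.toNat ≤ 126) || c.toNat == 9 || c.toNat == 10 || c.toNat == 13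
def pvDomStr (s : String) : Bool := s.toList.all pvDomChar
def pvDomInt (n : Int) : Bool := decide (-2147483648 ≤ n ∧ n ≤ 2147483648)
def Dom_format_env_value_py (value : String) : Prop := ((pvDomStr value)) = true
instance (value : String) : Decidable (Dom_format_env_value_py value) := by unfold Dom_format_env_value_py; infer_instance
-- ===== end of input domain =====

-- B fuses A's any()-scan and four replace passes into one traversal building the
-- escaped buffer and a needs-quote flag together (objective: alternative, same cost).

-- ===== PORT A =====
def format_env_value_py (value : String) : String :=
  if value = "" then ""
  else
    let special_chars : PySem.Set Char := PySem.Set.ofList " #\"'\\\n\r\t=".toList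
    if value.toList.any (fun c => special_chars.contains c) then
      let escaped := PySem.Str.replace (PySem.Str.replace (PySem.Str.replace
        (PySem.Str.replace value "\\" "\\\\") "\n" "\\n") "\r" "\\r") "\"" "\\\""
      "\"" ++ escaped ++ "\""
    else value

-- ===== PORT B =====
-- esc.get(c, c) of Source B
def pvEscChar (c : Char) : List Char :=
  if c = '\\' then ['\\', '\\']
  else if c = '\n' then ['\\', 'n']
  else if c = '\r' then ['\\', 'r']
  else if c = '"' then ['\\', '"']
  else [c]

def pvIsSpecial (c : Char) : Bool := " #\"'\\\n\r\t=".toList.contains c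

-- the for-loop of Source B: (buffer, needs_quote) accumulator
def pvEscLoop : List Char → List Char → Bool → List Char × Bool
  | [], buf, needs => (buf, needs)
  | c :: t, buf, needs => pvEscLoop t (buf ++ pvEscChar c) (needs || pvIsSpecial c)

def format_env_value_py_alt (value : String) : String :=
  let r := pvEscLoop value.toList [] false
  if r.2 then String.ofList ('"' :: r.1 ++ ['"']) else value

-- ===== PRECONDITION & SPEC =====
def Spec_format_env_value_py (value : String) (out : String) : Prop := out = format_env_value_py_alt value
instance (value : String) (out : String) : Decidable (Spec_format_env_value_py value out) := by unfold Spec_format_env_value_py; infer_instance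

-- ===== CLAIM (what is proved, stated in full; the proofs are below) =====
def Claim_equal_format_env_value_py : Prop := ∀ (value : String), Dom_format_env_value_py value → Spec_format_env_value_py value (format_env_value_py value)

-- ===== LEMMAS AND PROOFS =====

-- single-character str.replace is a per-character flatMap
theorem chars_replace_go_single (o : Char) (new : List Char) :
    ∀ (s acc : List Char) (fuel : Nat), s.length ≤ fuel →
      PySem.Chars.replace.go [o] new fuel s acc
        = acc.reverse ++ s.flatMap (fun c => if c = o then new else [c]) := by
  intro s
  induction s with
  | nil =>
    intro acc fuel _
    cases fuel <;> simp [PySem.Chars.replace.go]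
  | cons c t ih =>
    intro acc fuel h
    cases fuel with
    | zero => simp at h
    | succ fuel =>
      simp only [PySem.Chars.replace.go]
      by_cases hc : c = o
      · subst hc
        have hp : List.isPrefixOf [c] (c :: t) = true := by simp [List.isPrefixOf]
        simp only [hp, if_pos]
        rw [show List.drop [c].length (c :: t) = t by simp]
        rw [ih (new.reverse ++ acc) fuel (by simpa using h)]
        simp
      · have hp : List.isPrefixOf [o] (c :: t) = false := by
          simp [List.isPrefixOf]; exact fun h' => absurd h'.symm hc
        simp only [hp]
        rw [if_neg (by simp)]
        rw [ih (c :: acc) fuel (by simpa using h)]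
        simp [hc]

theorem chars_replace_single (o : Char) (new s : List Char) :
    PySem.Chars.replace s [o] new = s.flatMap (fun c => if c = o then new else [c]) := by
  rw [PySem.Chars.replace, if_neg (by simp)]
  exact chars_replace_go_single o new s [] s.length le_rfl

-- composing the four single-char replacements gives pvEscChar
theorem escaped_toList (l : List Char) :
    ((((l.flatMap (fun c => if c = '\\' then ['\\', '\\'] else [c])).flatMap
        (fun c => if c = '\n' then ['\\', 'n'] else [c])).flatMap
        (fun c => if c = '\r' then ['\\', 'r'] else [c])).flatMap
        (fun c => if c = '"' then ['\\', '"'] else [c]))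
      = l.flatMap pvEscChar := by
  simp only [List.flatMap_assoc]
  apply List.flatMap_congr
  intro c _
  by_cases h1 : c = '\\'
  · subst h1; decide
  · by_cases h2 : c = '\n'
    · subst h2; decide
    · by_cases h3 : c = '\r'
      · subst h3; decide
      · by_cases h4 : c = '"'
        · subst h4; decide
        · simp [pvEscChar, h1, h2, h3, h4]

-- B's loop invariant
theorem escLoop_spec (l : List Char) :
    ∀ (buf : List Char) (needs : Bool),
      pvEscLoop l buf needs = (buf ++ l.flatMap pvEscChar, needs || l.any pvIsSpecial) := by
  induction l with
  | nil => intro buf needs; simp [pvEscLoop]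
  | cons c t ih => intro buf needs; simp [pvEscLoop, ih, Bool.or_assoc]

-- A's membership test agrees with pvIsSpecial
theorem special_contains (c : Char) :
    (PySem.Set.ofList " #\"'\\\n\r\t=".toList).contains c = pvIsSpecial c := by
  have h : PySem.Set.ofList " #\"'\\\n\r\t=".toList = " #\"'\\\n\r\t=".toList := by decide
  rw [h]
  rfl

-- ===== VERDICT (by name: the statement is the Claim_ definition above) =====
theorem format_env_value_py_spec : Claim_equal_format_env_value_py := by
  intro value _
  unfold Spec_format_env_value_py format_env_value_py format_env_value_py_alt
  simp only [escLoop_spec, Bool.false_or, List.nil_append]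
  have hany : (value.toList.any fun c =>
      (PySem.Set.ofList " #\"'\\\n\r\t=".toList).contains c) = value.toList.any pvIsSpecial := by
    simp only [special_contains]
  by_cases hempty : value = ""
  · subst hempty; decide
  · rw [if_neg hempty, hany]
    by_cases hs : value.toList.any pvIsSpecial
    · rw [if_pos hs, if_pos hs]
      apply String.toList_inj.mp
      simp only [PySem.Str.toList_replace, String.toList_append, String.toList_ofList]
      rw [show ("\\\\" : String).toList = ['\\', '\\'] from rfl,
          show ("\\n" : String).toList = ['\\', 'n'] from rfl,
          show ("\\r" : String).toList = ['\\', 'r'] from rfl,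
          show ("\\\"" : String).toList = ['\\', '"'] from rfl,
          show ("\\" : String).toList = ['\\'] from rfl,
          show ("\n" : String).toList = ['\n'] from rfl,
          show ("\r" : String).toList = ['\r'] from rfl,
          show ("\"" : String).toList = ['"'] from rfl]
      simp only [chars_replace_single]
      rw [escaped_toList value.toList]
      rfl
    · rw [if_neg hs, if_neg hs]
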